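-- pv_equiv track=rewrite | github.com/joostrijneveld/sequencefinder | sequencefinding.py | linear_difference
-- ===== SOURCE A (Python) =====
-- def differences(a):
--     return [t - s for s, t in zip(a, a[1:])]
--
-- def constant_difference(a):
--     if len(a) <= 1:
--         return None
--     if all(a[1] - a[0] == x for x in differences(a)):
--         return a[1] - a[0]
--     else:
--         return None
--
-- def linear_difference(a):
--     depth = 1
--     while len(a) > 2:
--         cdiff = constant_difference(a)
--         if cdiff is not None:
--             return cdiff, depth
--         a = differences(a)
--         depth += 1
--     return None
-- ===== SOURCE B (Python) =====
-- def linear_difference(a):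
--     # Stencil method: the depth-k difference level is a fixed signed-binomial
--     # convolution of the ORIGINAL list, so maintain that coefficient row (Pascal
--     # update) instead of rewriting the data, and detect a constant-difference
--     # level k by testing that level k+1 is identically zero.
--     n = len(a)
--     s = [-1, 1]  # convolution stencil of the depth-1 difference level
--     for k in range(1, n - 1):
--         t = [p - q for p, q in zip([0] + s, s + [0])]  # stencil of level k+1
--         if all(sum(c * a[i + j] for j, c in enumerate(t)) == 0
--                for i in range(n - k - 2, -1, -1)):
--             return sum(c * a[j] for j, c in enumerate(s)), k
--         s = t
--     return None
-- ===== Notes on version B (the rewrite author's own statement) =====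
-- stated objective: alternative
-- what changed: B never iterates differences on the data: it maintains the signed-binomial convolution stencil of the current depth (Pascal-row update) over the ORIGINAL list, and detects a constant-difference level k by testing that the depth-(k+1) convolution is identically zero, returning the depth-k convolution at index 0.
import Mathlib
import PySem

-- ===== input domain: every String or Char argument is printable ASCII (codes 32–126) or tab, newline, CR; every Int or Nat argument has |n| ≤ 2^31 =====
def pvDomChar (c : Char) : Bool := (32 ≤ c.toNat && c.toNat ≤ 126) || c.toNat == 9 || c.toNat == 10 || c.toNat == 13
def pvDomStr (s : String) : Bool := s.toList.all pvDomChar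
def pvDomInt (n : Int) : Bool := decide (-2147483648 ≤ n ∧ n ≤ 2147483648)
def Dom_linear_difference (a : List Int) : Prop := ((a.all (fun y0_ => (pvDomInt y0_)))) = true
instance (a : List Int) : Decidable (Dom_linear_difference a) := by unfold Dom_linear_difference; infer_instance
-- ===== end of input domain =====

-- B replaces A's iterated rewriting of the data by a signed-binomial stencil (Pascal-row
-- update) convolved with the original list; same return value everywhere (objective: alternative).

-- ===== PORT A =====
-- [t - s for s, t in zip(a, a[1:])]
def differences (a : List Int) : List Int :=
  (a.zip a.tail).map (fun st => st.2 - st.1)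

theorem differences_length (a : List Int) : (differences a).length = a.length - 1 := by
  cases a <;> simp [differences, List.length_zip]

def constant_difference (a : List Int) : Option Int :=
  if a.length ≤ 1 then none
  else
    -- a[1] - a[0]; in this branch a.length ≥ 2, so headI/tail.headI are exactly a[0], a[1]
    let c := a.tail.headI - a.headI
    if (differences a).all (fun x => decide (c = x)) then some c else none

def linear_difference_go (a : List Int) (depth : Int) : Option (Int × Int) :=
  if _h : a.length > 2 then
    match constant_difference a with
    | some c => some (c, depth)
    | none => linear_difference_go (differences a) (depth + 1)
  else none
termination_by a.length
decreasing_by simp [differences_length]; omega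

def linear_difference (a : List Int) : Option (Int × Int) :=
  linear_difference_go a 1

-- ===== PORT B =====
-- sum(c * a[i + j] for j, c in enumerate(s)); a[i+j] is always in range where B uses it,
-- so List.getD (i+j) 0 is exact there
def dotStencil : List Int → List Int → Nat → Int
  | [], _, _ => 0
  | c :: s, a, i => c * a.getD i 0 + dotStencil s a (i + 1)

-- [p - q for p, q in zip([0] + s, s + [0])]
def stencilNext (s : List Int) : List Int :=
  (((0 : Int) :: s).zip (s ++ [0])).map (fun pq => pq.1 - pq.2)

-- the for-loop over k in range(1, n-1), carrying the stencil s of the depth-k level;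
-- range(n-k-2, -1, -1) is the reverse of range(0, n-k-1)
def linear_difference_alt_go (a : List Int) : List Nat → List Int → Option (Int × Int)
  | [], _ => none
  | k :: ks, s =>
    let t := stencilNext s
    if ((List.range' 0 (a.length - k - 1)).reverse).all (fun i => dotStencil t a i == 0) then
      some (dotStencil s a 0, (k : Int))
    else linear_difference_alt_go a ks t

def linear_difference_alt (a : List Int) : Option (Int × Int) :=
  linear_difference_alt_go a (List.range' 1 (a.length - 2)) [-1, 1]

-- ===== PRECONDITION & SPEC =====
def Spec_linear_difference (a : List Int) (out : Option (Int × Int)) : Prop := out = linear_difference_alt a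
instance (a : List Int) (out : Option (Int × Int)) : Decidable (Spec_linear_difference a out) := by unfold Spec_linear_difference; infer_instance

-- ===== CLAIM (what is proved, stated in full; the proofs are below) =====
def Claim_equal_linear_difference : Prop := ∀ (a : List Int), Dom_linear_difference a → Spec_linear_difference a (linear_difference a)

-- ===== LEMMAS AND PROOFS =====

-- the k-th iterated difference level (A's successive values of `a`)
def iterD : Nat → List Int → List Int
  | 0, a => a
  | k + 1, a => differences (iterD k a)

-- the stencil B carries at depth k (stencil 0 = [1] represents the original list)
def stencil : Nat → List Int
  | 0 => [1]
  | k + 1 => stencilNext (stencil k)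

theorem range'_succ_one (s n : Nat) : List.range' s (n + 1) = s :: List.range' (s + 1) n := by
  simp [List.range'_succ]

theorem differences_cons (x y : Int) (t : List Int) :
    differences (x :: y :: t) = (y - x) :: differences (y :: t) := by
  simp [differences]

theorem dot_consZip (s : List Int) : ∀ (x : Int) (a : List Int) (i : Nat),
    dotStencil (((x :: s).zip (s ++ [0])).map (fun pq => pq.1 - pq.2)) a i
      = x * a.getD i 0 + dotStencil s a (i + 1) - dotStencil s a i := by
  induction s with
  | nil => intro x a i; simp [dotStencil]
  | cons c s ih =>
    intro x a i
    simp only [List.cons_append, List.zip_cons_cons, List.map_cons, dotStencil]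
    rw [ih c a (i + 1)]
    simp; ring

theorem dot_stencilNext (s : List Int) (a : List Int) (i : Nat) :
    dotStencil (stencilNext s) a i = dotStencil s a (i + 1) - dotStencil s a i := by
  have h := dot_consZip s 0 a i
  simp only [stencilNext]
  rw [h]; ring

theorem differences_map_range' : ∀ (m st : Nat) (f : Nat → Int),
    differences ((List.range' st (m + 1)).map f)
      = (List.range' st m).map (fun i => f (i + 1) - f i) := by
  intro m
  induction m with
  | zero => intro st f; simp [differences]
  | succ m ih =>
    intro st f
    rw [range'_succ_one st (m + 1), List.map_cons, range'_succ_one (st + 1) m,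
      List.map_cons, differences_cons, range'_succ_one st m, List.map_cons]
    congr 1
    have hih := ih (st + 1) f
    rw [range'_succ_one (st + 1) m, List.map_cons] at hih
    exact hih

theorem map_range'_getD : ∀ (l p : List Int),
    (List.range' p.length l.length).map (fun i => (p ++ l).getD i 0) = l := by
  intro l
  induction l with
  | nil => intro p; simp
  | cons x l ih =>
    intro p
    rw [List.length_cons, range'_succ_one, List.map_cons]
    have h1 : (p ++ x :: l).getD p.length 0 = x := by
      simp [List.getD]
    have h2 : (List.range' (p.length + 1) l.length).map (fun i => (p ++ x :: l).getD i 0)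
        = l := by
      have := ih (p ++ [x])
      simpa [List.append_assoc] using this
    rw [h1, h2]

theorem iterD_repr (a : List Int) : ∀ k, k ≤ a.length →
    iterD k a = (List.range' 0 (a.length - k)).map (fun i => dotStencil (stencil k) a i) := by
  intro k
  induction k with
  | zero =>
    intro _
    have h := map_range'_getD a []
    simp only [List.nil_append, List.length_nil] at h
    simp only [iterD, stencil, Nat.sub_zero]
    have h2 : (List.range' 0 a.length).map (fun i => dotStencil [1] a i)
        = (List.range' 0 a.length).map (fun i => a.getD i 0) :=
      List.map_congr_left (by intro i _; simp [dotStencil])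
    exact (h2.trans h).symm
  | succ k ih =>
    intro hk
    have hk' : k ≤ a.length := Nat.le_of_succ_le hk
    have hm : a.length - k = (a.length - (k + 1)) + 1 := by omega
    rw [show iterD (k + 1) a = differences (iterD k a) from rfl, ih hk', hm,
      differences_map_range']
    apply List.map_congr_left
    intro i _
    rw [show stencil (k + 1) = stencilNext (stencil k) from rfl, dot_stencilNext]

theorem go_eq (a : List Int) : ∀ (j k : Nat), 1 ≤ k → j = a.length - 1 - k →
    linear_difference_go (iterD (k - 1) a) (k : Int)
      = linear_difference_alt_go a (List.range' k j) (stencil k) := by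
  intro j
  induction j with
  | zero =>
    intro k hk hj
    have hlen : (iterD (k - 1) a).length ≤ 2 := by
      -- length of iterD m a is a.length - m in general (by induction via differences_length)
      have hL : ∀ m (b : List Int), (iterD m b).length = b.length - m := by
        intro m
        induction m with
        | zero => intro b; simp [iterD]
        | succ m ihm => intro b; rw [show iterD (m+1) b = differences (iterD m b) from rfl,
            differences_length, ihm b]; omega
      rw [hL]; omega
    rw [linear_difference_go]
    simp only [List.range'_zero]
    rw [show linear_difference_alt_go a [] (stencil k) = none from rfl]
    simp [Nat.not_lt.mpr hlen]
  | succ j ihj =>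
    intro k hk hj
    have hn : a.length = k + j + 2 := by omega
    have hkn : k ≤ a.length := by omega
    have hk1n : k - 1 ≤ a.length := by omega
    -- representations
    have hrepr_km1 := iterD_repr a (k - 1) hk1n
    have hrepr_k := iterD_repr a k hkn
    have hlenL : a.length - (k - 1) = j + 3 := by omega
    have hlenK : a.length - k = j + 2 := by omega
    rw [linear_difference_go]
    have hLlen : (iterD (k - 1) a).length = j + 3 := by
      rw [hrepr_km1, List.length_map, List.length_range']; omega
    simp only [hLlen, show (2 : Nat) < j + 3 by omega, dif_pos]
    -- compute c = L[1] - L[0] = dot (stencil k) a 0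
    have hdiffL : differences (iterD (k - 1) a) = iterD k a := by
      have : iterD k a = iterD ((k - 1) + 1) a := by congr 1; omega
      rw [this]; rfl
    have hc : (iterD (k - 1) a).tail.headI - (iterD (k - 1) a).headI
        = dotStencil (stencil k) a 0 := by
      rw [hrepr_km1, hlenL]
      rw [range'_succ_one 0 (j + 2), range'_succ_one 1 (j + 1)]
      simp only [List.map_cons, List.tail_cons, List.headI]
      have hs : stencil k = stencilNext (stencil (k - 1)) := by
        conv_lhs => rw [show k = (k - 1) + 1 by omega]
        rfl
      rw [hs, dot_stencilNext]
    -- unfold constant_difference on L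
    have hCD : constant_difference (iterD (k - 1) a)
        = (if (iterD k a).all (fun x => decide (dotStencil (stencil k) a 0 = x))
           then some (dotStencil (stencil k) a 0) else none) := by
      rw [constant_difference]
      simp only [hLlen, show ¬ (j + 3 ≤ 1) by omega, if_false]
      rw [hc, hdiffL]
    -- B's test at this step
    rw [range'_succ_one k j]
    simp only [linear_difference_alt_go]
    have hstk1 : stencilNext (stencil k) = stencil (k + 1) := rfl
    have hBtestlen : a.length - k - 1 = j + 1 := by omega
    -- equivalence of the two boolean tests
    have htesteq : ((iterD k a).all (fun x => decide (dotStencil (stencil k) a 0 = x)))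
        = (((List.range' 0 (a.length - k - 1)).reverse).all
            (fun i => dotStencil (stencilNext (stencil k)) a i == 0)) := by
      rw [hrepr_k, hBtestlen, hlenK, List.all_map, List.all_reverse]
      apply Bool.eq_iff_iff.mpr
      simp only [List.all_eq_true, List.mem_range'_1, Function.comp, decide_eq_true_eq,
        beq_iff_eq, dot_stencilNext]
      constructor
      · intro h i hi
        have h1 := h (i + 1) (by omega)
        have h0 := h i (by omega)
        omega
      · intro h i hi
        have key : ∀ i, i < j + 1 →
            dotStencil (stencil k) a (i + 1) = dotStencil (stencil k) a i := by
          intro i hi2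
          have := h i (by omega)
          omega
        have hall : ∀ i, i ≤ j + 1 →
            dotStencil (stencil k) a i = dotStencil (stencil k) a 0 := by
          intro i
          induction i with
          | zero => intro _; rfl
          | succ i ihh => intro hi2; rw [key i (by omega), ihh (by omega)]
        have := hall i (by omega)
        omega
    rw [hCD, htesteq]
    by_cases ht : (((List.range' 0 (a.length - k - 1)).reverse).all
        (fun i => dotStencil (stencilNext (stencil k)) a i == 0)) = true
    · rw [ht]; simp
    · rw [Bool.eq_false_iff.mpr ht]
      simp only [Bool.false_eq_true, if_false]
      have hrec : linear_difference_go (differences (iterD (k - 1) a)) ((k : Int) + 1)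
          = linear_difference_alt_go a (List.range' (k + 1) j) (stencil (k + 1)) := by
        rw [hdiffL]
        have := ihj (k + 1) (by omega) (by omega)
        rw [show (k + 1) - 1 = k from rfl] at this
        rw [show ((k + 1 : Nat) : Int) = (k : Int) + 1 by push_cast; ring] at this
        exact this
      rw [hrec, hstk1]

-- ===== VERDICT (by name: the statement is the Claim_ definition above) =====
theorem linear_difference_spec : Claim_equal_linear_difference := by
  intro a _
  unfold Spec_linear_difference linear_difference linear_difference_alt
  have h := go_eq a (a.length - 2) 1 le_rfl (by omega)
  rw [show iterD 0 a = a from rfl] at h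
  rw [show stencil 1 = [-1, 1] by decide] at h
  exact h
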